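-- pv_equiv track=rewrite | github.com/ch83baker/cards_eq_solver | subset_graph_classes/my_subset_graph_new.py | encode_bin_tuple_to_int
-- ===== SOURCE A (Python) =====
-- def encode_bin_tuple_to_int(my_tuple, num_terms):
--     """Encode characteristic tuple as a string for compactness.
--
--     Parameters:
--     -----------
--     my_tuple: Iterable
--         The 0-1 tuple encoding membership in the subset
--     num_terms: int (positive)
--         the number of terms in your set of items
--     """
--     if len(my_tuple) != num_terms:
--         raise ValueError(f"Not a {num_terms}-length tuple!")
--     sum = 0
--     for j in range(num_terms):
--         if my_tuple[j]:
--             sum += 2**j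
--     return sum
-- ===== SOURCE B (Python) =====
-- def encode_bin_tuple_to_int(my_tuple, num_terms):
--     if len(my_tuple) != num_terms:
--         raise ValueError(f"Not a {num_terms}-length tuple!")
--     s = ''.join('1' if my_tuple[j] else '0' for j in reversed(range(num_terms)))
--     return int('0' + s, 2)
-- ===== Notes on version B (the rewrite author's own statement) =====
-- stated objective: alternative
-- what changed: B builds an MSB-first '0'/'1' string from the tuple and delegates the bit weighting to int(s, 2) base-2 parsing, instead of A's loop summing 2**j into an accumulator.
import Mathlib
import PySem

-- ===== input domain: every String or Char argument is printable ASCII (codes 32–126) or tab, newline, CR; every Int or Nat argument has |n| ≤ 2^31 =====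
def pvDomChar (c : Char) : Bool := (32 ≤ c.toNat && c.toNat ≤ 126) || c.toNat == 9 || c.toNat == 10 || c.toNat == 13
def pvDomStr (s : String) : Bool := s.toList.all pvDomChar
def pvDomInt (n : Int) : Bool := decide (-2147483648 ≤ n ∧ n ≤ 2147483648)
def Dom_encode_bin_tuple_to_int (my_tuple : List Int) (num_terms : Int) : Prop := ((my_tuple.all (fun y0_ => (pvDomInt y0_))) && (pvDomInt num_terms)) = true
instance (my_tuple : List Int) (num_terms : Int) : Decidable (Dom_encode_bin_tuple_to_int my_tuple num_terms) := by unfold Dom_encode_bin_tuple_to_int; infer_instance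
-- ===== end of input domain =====

-- B replaces A's accumulator of 2**j powers by building an MSB-first '0'/'1' string and
-- parsing it in base 2 (int('0'+s, 2)); return values agree on all inputs where A returns.

-- ===== PORT A =====
-- 'for j in range(num_terms): if my_tuple[j]: sum += 2**j'; under Pre_ the index is in range,
-- so pyGetD with default 0 is exact. Out of Pre_ Python raises ValueError; the port returns 0 there.
def encode_bin_tuple_to_int (my_tuple : List Int) (num_terms : Int) : Int :=
  if (my_tuple.length : Int) ≠ num_terms then 0
  else
    (PySem.List.pyRange 0 num_terms 1).foldl
      (fun s j => if PySem.List.pyGetD my_tuple j 0 ≠ 0 then s + 2 ^ j.toNat else s) 0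

-- ===== PORT B =====
-- the generator ''.join('1' if my_tuple[j] else '0' for j in reversed(range(num_terms)))
-- then int('0' + s, 2), ported by hand as the exact base-2 parse of a '0'/'1' character list.
def encode_bin_tuple_to_int_alt (my_tuple : List Int) (num_terms : Int) : Int :=
  if (my_tuple.length : Int) ≠ num_terms then 0
  else
    let s : List Char := (PySem.List.pyRange 0 num_terms 1).reverse.map
      (fun j => if PySem.List.pyGetD my_tuple j 0 ≠ 0 then '1' else '0')
    ('0' :: s).foldl (fun acc c => 2 * acc + (if c = '1' then 1 else 0)) 0

-- ===== PRECONDITION & SPEC =====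
-- Pre_: A raises ValueError exactly when len(my_tuple) != num_terms.
def Pre_encode_bin_tuple_to_int (my_tuple : List Int) (num_terms : Int) : Prop :=
  (my_tuple.length : Int) = num_terms
instance (my_tuple : List Int) (num_terms : Int) : Decidable (Pre_encode_bin_tuple_to_int my_tuple num_terms) := by unfold Pre_encode_bin_tuple_to_int; infer_instance
def pvWitness_encode_bin_tuple_to_int : List Int × Int := ([1, 0, 1], 3)

def Spec_encode_bin_tuple_to_int (my_tuple : List Int) (num_terms : Int) (out : Int) : Prop := out = encode_bin_tuple_to_int_alt my_tuple num_terms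
instance (my_tuple : List Int) (num_terms : Int) (out : Int) : Decidable (Spec_encode_bin_tuple_to_int my_tuple num_terms out) := by unfold Spec_encode_bin_tuple_to_int; infer_instance

-- ===== CLAIM (what is proved, stated in full; the proofs are below) =====
def Claim_equal_encode_bin_tuple_to_int : Prop := ∀ (my_tuple : List Int) (num_terms : Int), Dom_encode_bin_tuple_to_int my_tuple num_terms → Pre_encode_bin_tuple_to_int my_tuple num_terms → Spec_encode_bin_tuple_to_int my_tuple num_terms (encode_bin_tuple_to_int my_tuple num_terms)

-- ===== LEMMAS AND PROOFS =====

-- pulling the accumulator out of the base-2 parse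
theorem pvParseAcc (l : List Char) (acc : Int) :
    l.foldl (fun a c => 2 * a + (if c = '1' then 1 else 0)) acc
      = acc * 2 ^ l.length + l.foldl (fun a c => 2 * a + (if c = '1' then 1 else 0)) 0 := by
  induction l generalizing acc with
  | nil => simp
  | cons c l ih =>
    simp only [List.foldl_cons, List.length_cons]
    rw [ih (2 * acc + _), ih (2 * 0 + _)]
    ring

-- the core identity: A's power sum over range(len t) equals B's parse of '0' ++ reversed bit string
theorem pvKey (t : List Int) :
    (PySem.List.pyRange 0 (t.length : Int) 1).foldl
      (fun (s : Int) j => if PySem.List.pyGetD t j 0 ≠ 0 then s + 2 ^ j.toNat else s) 0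
    = ('0' :: (PySem.List.pyRange 0 (t.length : Int) 1).reverse.map
        (fun j => if PySem.List.pyGetD t j 0 ≠ 0 then '1' else '0')).foldl
        (fun (acc : Int) c => 2 * acc + (if c = '1' then 1 else 0)) 0 := by
  have h0 : (if ('0' : Char) = '1' then (1 : Int) else 0) = 0 := by decide
  induction t using List.reverseRecOn with
  | nil => simp [PySem.List.pyRange_one_eq_nil]
  | append_singleton t x ih =>
    have hagree : ∀ j ∈ PySem.List.pyRange 0 (t.length : Int) 1,
        PySem.List.pyGetD (t ++ [x]) j 0 = PySem.List.pyGetD t j 0 := by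
      intro j hj
      rw [PySem.List.mem_pyRange_one] at hj
      have hjlen : j < (t.length : Int) := hj.2
      rw [PySem.List.pyGetD_eq_getElem _ _ hj.1 (by simp; omega),
          PySem.List.pyGetD_eq_getElem _ _ hj.1 hjlen]
      exact List.getElem_append_left (by omega)
    have hx : PySem.List.pyGetD (t ++ [x]) (t.length : Int) 0 = x := by
      rw [PySem.List.pyGetD_eq_getElem _ _ (by positivity) (by simp)]
      simp
    have hlen : ((t ++ [x]).length : Int) = (t.length : Int) + 1 := by simp
    rw [hlen, PySem.List.pyRange_one_succ_right (by positivity)]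
    -- A side: split off the last index and reduce indexing into t ++ [x] to indexing into t
    rw [List.foldl_append,
        PySem.List.foldl_congr_mem _ _
          (fun (s : Int) j => if PySem.List.pyGetD t j 0 ≠ 0 then s + 2 ^ j.toNat else s) 0
          (fun acc j hj => by rw [hagree j hj])]
    -- B side: the new bit is the first digit after the guard '0'
    rw [List.reverse_append]
    simp only [List.reverse_singleton, List.singleton_append, List.map_cons, List.foldl_cons,
      List.foldl_nil, h0]
    rw [List.map_congr_left
          (fun j hj => by rw [hagree j (List.mem_reverse.mp hj)] :
            ∀ j ∈ (PySem.List.pyRange 0 (t.length : Int) 1).reverse,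
              (if PySem.List.pyGetD (t ++ [x]) j 0 ≠ 0 then '1' else '0')
                = (if PySem.List.pyGetD t j 0 ≠ 0 then '1' else '0'))]
    rw [hx, pvParseAcc]
    simp only [List.foldl_cons, h0, mul_zero, add_zero, zero_add] at ih ⊢
    simp only [List.length_map, List.length_reverse, PySem.List.length_pyRange_one]
    have htn : (((t.length : Int)) - 0).toNat = t.length := by omega
    have htn2 : ((t.length : Int)).toNat = t.length := by omega
    rw [htn, htn2, ← ih]
    by_cases hx0 : x = 0
    · simp [hx0]
    · simp [hx0]; ring

-- ===== VERDICT (by name: the statement is the Claim_ definition above) =====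
theorem encode_bin_tuple_to_int_spec : Claim_equal_encode_bin_tuple_to_int := by
  intro t n _ hpre
  unfold Spec_encode_bin_tuple_to_int encode_bin_tuple_to_int encode_bin_tuple_to_int_alt
  unfold Pre_encode_bin_tuple_to_int at hpre
  rw [← hpre]
  have h := pvKey t
  simp only [ne_eq] at h ⊢
  simp only [not_true_eq_false, if_false]
  exact h
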